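-- pv_equiv track=rewrite | github.com/Freeze777/SDE-Interviewer-Notes | CodingInterview/Medium/Strings/StringCompression.py | right_shift_empty_slots
-- ===== SOURCE A (Python) =====
-- def right_shift_empty_slots(arr):
--     count = 0
--     for i in range(len(arr)):
--         if arr[i] != '':
--             arr[count] = arr[i]
--             count += 1
--     while count < len(arr):
--         arr[count] = ''
--         count += 1
--     return arr
-- ===== SOURCE B (Python) =====
-- def right_shift_empty_slots(arr):
--     # stable sort by emptiness: non-empty (key False) first, empties (key True) last
--     arr[:] = sorted(arr, key=lambda x: x == '')
--     return arr
-- ===== Notes on version B (the rewrite author's own statement) =====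
-- stated objective: simpler
-- what changed: Replaces the two-pointer write-index compaction plus trailing while-fill with a single stable sort keyed on emptiness (non-empty before empty), assigned back in place via arr[:].
import Mathlib
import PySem

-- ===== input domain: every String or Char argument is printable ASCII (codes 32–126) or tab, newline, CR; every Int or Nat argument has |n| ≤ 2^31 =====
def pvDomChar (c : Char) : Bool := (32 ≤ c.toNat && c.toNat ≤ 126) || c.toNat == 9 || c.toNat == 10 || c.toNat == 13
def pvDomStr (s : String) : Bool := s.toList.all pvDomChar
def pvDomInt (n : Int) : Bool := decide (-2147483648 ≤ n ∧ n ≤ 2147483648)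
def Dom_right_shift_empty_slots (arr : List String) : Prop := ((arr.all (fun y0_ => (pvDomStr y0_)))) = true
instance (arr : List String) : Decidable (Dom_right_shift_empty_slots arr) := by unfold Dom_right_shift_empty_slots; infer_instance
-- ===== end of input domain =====

-- B replaces A's two-pointer in-place compaction with ONE stable sort keyed on emptiness
-- (objective: simpler); both Pythons mutate the caller's list identically, the theorems
-- here are about the return value.

-- ===== PORT A =====
-- one step of A's for-loop: read arr[i] from the current (mutated) list, write at `count` if non-empty
def pvStepA (st : List String × Nat) (i : Nat) : List String × Nat :=
  let x := st.1.getD i ""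
  if x ≠ "" then (st.1.set st.2 x, st.2 + 1) else st

-- A's trailing while-loop: arr[count] = '' ; count += 1 while count < len(arr)
def pvFillA (lst : List String) (count : Nat) : List String :=
  if h : count < lst.length then pvFillA (lst.set count "") (count + 1) else lst
termination_by lst.length - count
decreasing_by simp; omega

def right_shift_empty_slots (arr : List String) : List String :=
  let st := (List.range arr.length).foldl pvStepA (arr, 0)
  pvFillA st.1 st.2

-- ===== PORT B =====
-- Python's bool sort key (False < True) is ported as the Nat key 0/1.
def pvKeyB (x : String) : Nat := if x == "" then 1 else 0

def right_shift_empty_slots_alt (arr : List String) : List String :=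
  PySem.List.sorted arr pvKeyB false

-- ===== PRECONDITION & SPEC =====
def Spec_right_shift_empty_slots (arr : List String) (out : List String) : Prop := out = right_shift_empty_slots_alt arr
instance (arr : List String) (out : List String) : Decidable (Spec_right_shift_empty_slots arr out) := by unfold Spec_right_shift_empty_slots; infer_instance

-- ===== CLAIM (what is proved, stated in full; the proofs are below) =====
def Claim_equal_right_shift_empty_slots : Prop := ∀ (arr : List String), Dom_right_shift_empty_slots arr → Spec_right_shift_empty_slots arr (right_shift_empty_slots arr)

-- ===== LEMMAS AND PROOFS =====

-- loop invariant for A's for-loop after processing indices [0, i)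
lemma pvLoopA_inv (arr : List String) : ∀ i, i ≤ arr.length →
    ((List.range i).foldl pvStepA (arr, 0)).1.length = arr.length ∧
    ((List.range i).foldl pvStepA (arr, 0)).2 = ((arr.take i).filter (fun x => x ≠ "")).length ∧
    ((List.range i).foldl pvStepA (arr, 0)).1.take ((List.range i).foldl pvStepA (arr, 0)).2
      = (arr.take i).filter (fun x => x ≠ "") ∧
    ((List.range i).foldl pvStepA (arr, 0)).1.drop i = arr.drop i := by
  intro i
  induction i with
  | zero => intro _; simp
  | succ i ih =>
    intro hle
    have hi : i < arr.length := by omega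
    obtain ⟨hlen, hcnt, htake, hdrop⟩ := ih (by omega)
    set st := (List.range i).foldl pvStepA (arr, 0) with hst
    have hstep : (List.range (i+1)).foldl pvStepA (arr, 0) = pvStepA st i := by
      rw [List.range_succ, List.foldl_append]; rfl
    -- the element read at index i is the original arr[i]
    have hx : st.1.getD i "" = arr[i] := by
      have h1 : st.1[i]? = (st.1.drop i)[0]? := by simp [List.getElem?_drop]
      have h2 : arr[i]? = (arr.drop i)[0]? := by simp [List.getElem?_drop]
      have hq : st.1[i]? = arr[i]? := by rw [h1, h2, hdrop]
      simp only [List.getD_eq_getElem?_getD, hq]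
      simp [hi]
    have hcle : st.2 ≤ i := by
      rw [hcnt]
      calc ((arr.take i).filter (fun x => x ≠ "")).length
          ≤ (arr.take i).length := List.length_filter_le _ _
        _ ≤ i := by simp
    have htake_succ : arr.take (i+1) = arr.take i ++ [arr[i]] := by
      rw [List.take_add_one]; simp [hi]
    have hstepEq : pvStepA st i
        = if arr[i] ≠ "" then (st.1.set st.2 arr[i], st.2 + 1) else st := by
      simp only [pvStepA, hx]
    rw [hstep, hstepEq]
    by_cases hne : arr[i] ≠ ""
    · rw [if_pos hne]
      have hclt : st.2 < st.1.length := by omega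
      have hset : st.1.set st.2 arr[i] = st.1.take st.2 ++ arr[i] :: st.1.drop (st.2+1) := by
        rw [List.set_eq_take_append_cons_drop, if_pos hclt]
      refine ⟨by simp [hlen], ?_, ?_, ?_⟩
      · rw [htake_succ, List.filter_append, hcnt]
        simp [hne]
      · rw [hset, htake_succ, List.filter_append]
        have hl : (st.1.take st.2).length = st.2 := by simp; omega
        rw [show st.2 + 1 = (st.1.take st.2).length + 1 from by omega, List.take_append]
        rw [htake]
        simp [hne]
      · rw [List.drop_set_of_lt (show st.2 < i + 1 from by omega)]
        have := congrArg (List.drop 1) hdrop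
        simpa [List.drop_drop, Nat.add_comm] using this
    · rw [if_neg hne]
      have heq : arr[i] = "" := by
        by_contra hcon; exact hne hcon
      refine ⟨hlen, ?_, ?_, ?_⟩
      · rw [htake_succ, List.filter_append, hcnt]; simp [heq]
      · rw [htake_succ, List.filter_append, htake]; simp [heq]
      · have := congrArg (List.drop 1) hdrop
        simpa [List.drop_drop, Nat.add_comm] using this

-- A's while-loop blanks every slot from `count` on
lemma pvFillA_eq (lst : List String) (count : Nat) :
    pvFillA lst count = lst.take count ++ List.replicate (lst.length - count) "" := by
  by_cases h : count < lst.length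
  · rw [pvFillA]
    rw [dif_pos h]
    rw [pvFillA_eq (lst.set count "") (count + 1)]
    have hset : lst.set count "" = lst.take count ++ "" :: lst.drop (count+1) := by
      rw [List.set_eq_take_append_cons_drop, if_pos h]
    have hl : (lst.take count).length = count := by simp; omega
    rw [hset]
    have hlen : (lst.take count ++ "" :: lst.drop (count+1)).length = lst.length := by
      simp; omega
    rw [hlen, List.take_append, List.take_of_length_le (by rw [hl]; omega), hl]
    have h1 : count + 1 - count = 1 := by omega
    rw [h1]
    have hrep : lst.length - count = (lst.length - (count + 1)) + 1 := by omega
    rw [hrep, List.replicate_succ]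
    simp
  · rw [pvFillA, dif_neg h]
    have h0 : lst.length - count = 0 := by omega
    rw [h0, List.take_of_length_le (by omega)]
    simp
termination_by lst.length - count
decreasing_by simp; omega

-- the insertion predicate underlying PySem's stable sort with key pvKeyB
def pvBeforeB (a b : String) : Bool := decide (pvKeyB a < pvKeyB b)

-- inserting a non-empty element into "non-empties ++ blanks" puts it right before the blanks
lemma pvInsertB_nonempty (x : String) (hx : x ≠ "") :
    ∀ (kept : List String) (k : Nat), (∀ y ∈ kept, y ≠ "") →
    PySem.List.insertBy pvBeforeB x (kept ++ List.replicate k "")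
      = (kept ++ [x]) ++ List.replicate k "" := by
  intro kept
  induction kept with
  | nil =>
    intro k _
    cases k with
    | zero => simp [PySem.List.insertBy]
    | succ k =>
      simp only [List.nil_append, List.replicate_succ, PySem.List.insertBy]
      have : pvBeforeB x "" = true := by
        simp [pvBeforeB, pvKeyB, hx]
      rw [if_pos this]
      simp
  | cons y ys ih =>
    intro k hall
    have hy : y ≠ "" := hall y (by simp)
    have hby : pvBeforeB x y = false := by
      simp [pvBeforeB, pvKeyB, hx, hy]
    simp only [List.cons_append, PySem.List.insertBy, hby]
    rw [ih k (fun z hz => hall z (by simp [hz]))]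
    simp

-- inserting an empty element appends it at the very end
lemma pvInsertB_empty (lst : List String) :
    PySem.List.insertBy pvBeforeB "" lst = lst ++ [""] := by
  apply PySem.List.insertBy_of_forall_not_before
  intro y _
  by_cases h : y = "" <;> simp [pvBeforeB, pvKeyB, h]

-- invariant of the sort's foldl over the input: acc stays "non-empties ++ blanks"
lemma pvSortB_inv : ∀ (t kept : List String) (k : Nat), (∀ y ∈ kept, y ≠ "") →
    t.foldl (fun acc x => PySem.List.insertBy pvBeforeB x acc) (kept ++ List.replicate k "")
      = (kept ++ t.filter (fun x => x ≠ "")) ++ List.replicate (k + t.countP (fun x => x == "")) "" := by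
  intro t
  induction t with
  | nil => intro kept k _; simp
  | cons x rest ih =>
    intro kept k hall
    by_cases hx : x = ""
    · subst hx
      simp only [List.foldl_cons, pvInsertB_empty]
      have : (kept ++ List.replicate k "") ++ [""] = kept ++ List.replicate (k+1) "" := by
        rw [List.append_assoc]
        congr 1
        rw [List.replicate_succ']
      rw [this, ih kept (k+1) hall]
      simp only [List.filter_cons, List.countP_cons]
      norm_num
      omega
    · simp only [List.foldl_cons, pvInsertB_nonempty x hx kept k hall]
      rw [ih (kept ++ [x]) k (by intro y hy; rcases List.mem_append.mp hy with h | h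
                                 · exact hall y h
                                 · simp at h; subst h; exact hx)]
      simp only [List.filter_cons, List.countP_cons]
      simp [hx, List.append_assoc]

-- counting: blanks = length minus non-blanks
lemma pvCountB (l : List String) :
    l.countP (fun x => x == "") = l.length - (l.filter (fun x => x ≠ "")).length := by
  have h : (l.filter (fun x => x ≠ "")).length + l.countP (fun x => x == "") = l.length := by
    induction l with
    | nil => simp
    | cons x t ih =>
      simp only [List.countP_cons, List.filter_cons]
      by_cases hx : x = "" <;> simp [hx] at ih ⊢ <;> omega
  omega

-- B's sort, characterised: non-empties in order, then the blanks
lemma pvAltB_eq (arr : List String) :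
    right_shift_empty_slots_alt arr
      = arr.filter (fun x => x ≠ "") ++ List.replicate (arr.length - (arr.filter (fun x => x ≠ "")).length) "" := by
  unfold right_shift_empty_slots_alt
  have h0 : PySem.List.sorted arr pvKeyB false
      = arr.foldl (fun acc x => PySem.List.insertBy pvBeforeB x acc) ([] ++ List.replicate 0 "") := rfl
  rw [h0, pvSortB_inv arr [] 0 (by intro y hy; simp at hy)]
  simp [pvCountB]

-- ===== VERDICT (by name: the statement is the Claim_ definition above) =====
theorem right_shift_empty_slots_spec : Claim_equal_right_shift_empty_slots := by
  intro arr _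
  unfold Spec_right_shift_empty_slots right_shift_empty_slots
  obtain ⟨hlen, hcnt, htake, _⟩ := pvLoopA_inv arr arr.length (le_refl _)
  set st := (List.range arr.length).foldl pvStepA (arr, 0) with hst
  simp only
  rw [pvFillA_eq, htake, hlen, hcnt, pvAltB_eq]
  simp
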